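-- pv_equiv track=rewrite | github.com/Zurionek/Arkana-Pythona | dis-track/dis-track.py | mixer
-- ===== SOURCE A (Python) =====
-- def mixer(p):
--   ... # OH NO! This function was REMOVED!
--   ... # But we still have its disassembly!
--   ... # Try to reverse engineer it!
--
--   #Module 4 - 6
--   p = list(p)
--   m = []
--   s = 947
--
--   #Module 7 - 9
--   for _ in range(len(p)):
--     s = ((s * 751) + 1439) % 683
--     m.append(p.pop(s % len(p)))
--
--   #Module 10
--   return ''.join(m)
-- ===== SOURCE B (Python) =====
-- def _build(chars):
--     # counted binary tree over chars: ('L', alive, ch) | ('N', alive_count, left, right)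
--     n = len(chars)
--     if n == 1:
--         return ('L', 1, chars[0])
--     m = n // 2
--     return ('N', n, _build(chars[:m]), _build(chars[m:]))
--
-- def _cnt(t):
--     return t[1]
--
-- def _select(t, k):
--     # return (k-th alive char of t, t with that char marked dead); 0 <= k < t's alive count
--     if t[0] == 'L':
--         return t[2], ('L', t[1] - 1, t[2])
--     _, c, l, r = t
--     cl = _cnt(l)
--     if k < cl:
--         x, l2 = _select(l, k)
--         return x, ('N', c - 1, l2, r)
--     x, r2 = _select(r, k - cl)
--     return x, ('N', c - 1, l, r2)
--
-- def mixer(p):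
--     chars = list(p)
--     n = len(chars)
--     if n == 0:
--         return ''
--     t = _build(chars)
--     out = []
--     s = 947
--     rem = n
--     for _ in range(n):
--         s = (s * 751 + 1439) % 683
--         x, t = _select(t, s % rem)
--         out.append(x)
--         rem -= 1
--     return ''.join(out)
-- ===== Notes on version B (the rewrite author's own statement) =====
-- stated objective: faster
-- what changed: B replaces A's repeated list.pop on a shrinking list (O(n) per step) by a counted binary tree over the characters, selecting and deleting the k-th remaining character in O(log n) per step.
import Mathlib
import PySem

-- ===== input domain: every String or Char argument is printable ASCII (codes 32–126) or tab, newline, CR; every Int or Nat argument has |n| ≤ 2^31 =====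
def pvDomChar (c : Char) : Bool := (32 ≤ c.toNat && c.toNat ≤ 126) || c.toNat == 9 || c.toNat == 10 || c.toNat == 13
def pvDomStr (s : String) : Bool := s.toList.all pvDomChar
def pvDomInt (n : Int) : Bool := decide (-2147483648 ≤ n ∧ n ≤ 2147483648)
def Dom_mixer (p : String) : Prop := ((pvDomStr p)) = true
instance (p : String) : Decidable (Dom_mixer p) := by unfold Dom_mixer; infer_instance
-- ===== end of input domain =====

-- B replaces A's repeated list.pop on a shrinking list (O(n^2)) by a counted binary
-- tree over the characters: k-th-remaining selection and deletion in O(log n) per step.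

-- ===== PORT A =====
-- the for-loop runs exactly len(p) times; each iteration pops one element
def mixerGo : Nat → List Char → Int → List Char
  | 0, _, _ => []
  | n+1, cur, s =>
    let s' := PySem.Int.mod (s * 751 + 1439) 683
    match PySem.List.pop? cur (PySem.Int.mod s' (cur.length : Int)) with
    | some (x, rest) => x :: mixerGo n rest s'
    | none => []  -- unreachable: on reachable states cur.length = n+1 > 0 and the index is in range

def mixer (p : String) : String :=
  String.mk (mixerGo p.toList.length p.toList 947)

-- ===== PORT B =====
-- ('L', alive, ch) / ('N', count, l, r) of Source B
inductive CTree where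
  | leaf : Nat → Char → CTree
  | node : Nat → CTree → CTree → CTree
deriving DecidableEq, Repr

def cntT : CTree → Nat
  | .leaf a _ => a
  | .node c _ _ => c

-- Source B's _build; Python never calls it on [], the [] arm is unreachable
def build : List Char → CTree
  | [] => .leaf 0 ' '
  | [c] => .leaf 1 c
  | c1 :: c2 :: rest =>
    let cs := c1 :: c2 :: rest
    .node cs.length (build (cs.take (cs.length / 2))) (build (cs.drop (cs.length / 2)))
termination_by cs => cs.length
decreasing_by
  · simp; omega
  · simp; omega

-- Source B's _select
def selectT : CTree → Nat → Char × CTree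
  | .leaf a ch, _ => (ch, .leaf (a - 1) ch)
  | .node c l r, k =>
    if k < cntT l then
      let q := selectT l k
      (q.1, .node (c - 1) q.2 r)
    else
      let q := selectT r (k - cntT l)
      (q.1, .node (c - 1) l q.2)

-- k = s % remaining is nonnegative (remaining > 0 on reachable states), so toNat is exact
def mixerAltGo : Nat → CTree → Int → Nat → List Char
  | 0, _, _, _ => []
  | n+1, t, s, rem =>
    let s' := PySem.Int.mod (s * 751 + 1439) 683
    let k := (PySem.Int.mod s' (rem : Int)).toNat
    let q := selectT t k
    q.1 :: mixerAltGo n q.2 s' (rem - 1)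

def mixer_alt (p : String) : String :=
  let cs := p.toList
  if cs.length = 0 then ""
  else String.mk (mixerAltGo cs.length (build cs) 947 cs.length)

-- ===== PRECONDITION & SPEC =====
def Spec_mixer (p : String) (out : String) : Prop := out = mixer_alt p
instance (p : String) (out : String) : Decidable (Spec_mixer p out) := by unfold Spec_mixer; infer_instance

-- ===== CLAIM (what is proved, stated in full; the proofs are below) =====
def Claim_equal_mixer : Prop := ∀ (p : String), Dom_mixer p → Spec_mixer p (mixer p)

-- ===== LEMMAS AND PROOFS =====

-- the characters of the tree still alive, in position order
def flT : CTree → List Char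
  | .leaf a ch => if 0 < a then [ch] else []
  | .node _ l r => flT l ++ flT r

-- well-formedness: every stored count is the number of alive leaves below it
def goodT : CTree → Bool
  | .leaf a _ => a ≤ 1
  | .node c l r => goodT l && goodT r && (c = cntT l + cntT r)

theorem cntT_eq_length (t : CTree) (h : goodT t = true) : cntT t = (flT t).length := by
  induction t with
  | leaf a ch => simp [goodT] at h; interval_cases a <;> simp [cntT, flT]
  | node c l r ihl ihr =>
    simp [goodT] at h
    rw [show cntT (CTree.node c l r) = c from rfl, h.2, ihl h.1.1, ihr h.1.2]
    simp [flT]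

theorem selectT_spec (t : CTree) (k : Nat) (hg : goodT t = true) (hk : k < cntT t) :
    (selectT t k).1 = (flT t).getD k ' ' ∧
    flT (selectT t k).2 = (flT t).eraseIdx k ∧
    goodT (selectT t k).2 = true ∧
    cntT (selectT t k).2 = cntT t - 1 := by
  induction t generalizing k with
  | leaf a ch =>
    simp [goodT] at hg
    simp [cntT] at hk
    have ha : a = 1 := by omega
    have hk0 : k = 0 := by omega
    subst ha hk0
    simp [selectT, flT, cntT, goodT]
  | node c l r ihl ihr =>
    simp [goodT] at hg
    obtain ⟨⟨hgl, hgr⟩, hc⟩ := hg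
    have hll := cntT_eq_length l hgl
    by_cases hlt : k < cntT l
    · obtain ⟨e1, e2, e3, e4⟩ := ihl k hgl hlt
      refine ⟨?_, ?_, ?_, ?_⟩
      · simp [selectT, hlt, e1, flT, List.getD_eq_getElem?_getD]
        rw [List.getElem?_append_left (by omega)]
      · simp [selectT, hlt, flT, e2]
        rw [List.eraseIdx_append_of_lt_length (by omega)]
      · simp [selectT, hlt, goodT, e3, hgr, e4, hc]
        omega
      · simp only [selectT]
        rw [if_pos hlt]
        rfl
    · have hkl : cntT l ≤ k := by omega
      have hkr : k - cntT l < cntT r := by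
        rw [show cntT (CTree.node c l r) = c from rfl] at hk; omega
      obtain ⟨e1, e2, e3, e4⟩ := ihr (k - cntT l) hgr hkr
      refine ⟨?_, ?_, ?_, ?_⟩
      · simp [selectT, hlt, e1, flT, List.getD_eq_getElem?_getD]
        rw [List.getElem?_append_right (by omega), hll]
      · simp [selectT, hlt, flT, e2]
        rw [List.eraseIdx_append_of_length_le (by omega), hll]
      · simp [selectT, hlt, goodT, e3, hgl, e4, hc]
        omega
      · simp only [selectT]
        rw [if_neg hlt]
        rfl

theorem build_spec : ∀ (cs : List Char), cs ≠ [] →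
    flT (build cs) = cs ∧ goodT (build cs) = true ∧ cntT (build cs) = cs.length := by
  intro cs
  induction cs using build.induct with
  | case1 => intro h; simp at h
  | case2 c => intro _; simp [build, flT, goodT, cntT]
  | case3 c1 c2 rest cs ih1 ih2 =>
    intro _
    have hcs : cs = c1 :: c2 :: rest := rfl
    rw [hcs] at ih1 ih2
    have hlen : (c1 :: c2 :: rest).length = rest.length + 2 := by simp
    have h1 := ih1 (by simp [List.take_eq_nil_iff])
    have h2 := ih2 (by simp; omega)
    refine ⟨?_, ?_, ?_⟩
    · simp only [build, flT, h1.1, h2.1]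
      exact List.take_append_drop _ _
    · simp only [build, goodT, Bool.and_eq_true]
      refine ⟨⟨h1.2.1, h2.2.1⟩, ?_⟩
      rw [h1.2.2, h2.2.2]
      simp
      omega
    · simp [build, cntT]

theorem go_eq :
    ∀ (n : Nat) (t : CTree) (cur : List Char) (s : Int),
    goodT t = true → cur = flT t → cur.length = n → cntT t = n →
    mixerGo n cur s = mixerAltGo n t s n := by
  intro n
  induction n with
  | zero => intro t cur s _ _ _ _; simp [mixerGo, mixerAltGo]
  | succ n ih =>
    intro t cur s hg hcur hn hcnt
    have hpos : 0 < cur.length := by omega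
    set s' := PySem.Int.mod (s * 751 + 1439) 683 with hs'
    have hmnn : 0 ≤ PySem.Int.mod s' (cur.length : Int) :=
      PySem.Int.mod_nonneg _ (by exact_mod_cast hpos)
    have hmlt : PySem.Int.mod s' (cur.length : Int) < (cur.length : Int) :=
      PySem.Int.mod_lt _ (by exact_mod_cast hpos)
    set k := (PySem.Int.mod s' (cur.length : Int)).toNat with hkdef
    have hkcast : (PySem.Int.mod s' (cur.length : Int)) = (k : Int) := by
      simp [hkdef, Int.toNat_of_nonneg hmnn]
    have hklt : k < cur.length := by omega
    have hpop : PySem.List.pop? cur (PySem.Int.mod s' (cur.length : Int)) =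
        some (cur[k], cur.eraseIdx k) := by
      rw [hkcast]; exact PySem.List.pop?_natCast cur k hklt
    obtain ⟨e1, e2, e3, e4⟩ := selectT_spec t k hg (by omega)
    have hget : (selectT t k).1 = cur[k] := by
      rw [e1, ← hcur, List.getD_eq_getElem _ _ hklt]
    show (let s' := PySem.Int.mod (s * 751 + 1439) 683;
      match PySem.List.pop? cur (PySem.Int.mod s' (cur.length : Int)) with
      | some (x, rest) => x :: mixerGo n rest s'
      | none => []) = _
    rw [show mixerAltGo (n+1) t s (n+1) =
      (let s' := PySem.Int.mod (s * 751 + 1439) 683;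
       let k' := (PySem.Int.mod s' ((n+1 : Nat) : Int)).toNat;
       let q := selectT t k';
       q.1 :: mixerAltGo n q.2 s' (n+1-1)) from rfl]
    have hcast : ((n+1 : Nat) : Int) = (cur.length : Int) := by rw [hn]
    simp only [← hs']
    rw [hcast, hpop, ← hkdef, hget]
    congr 1
    have hrest : cur.eraseIdx k = flT (selectT t k).2 := by rw [e2, hcur]
    have hlen' : (cur.eraseIdx k).length = n := by
      rw [List.length_eraseIdx_of_lt hklt]; omega
    simpa using ih (selectT t k).2 (cur.eraseIdx k) s' e3 hrest hlen' (by omega)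

-- ===== VERDICT (by name: the statement is the Claim_ definition above) =====
theorem mixer_spec : Claim_equal_mixer := by
  intro p _
  unfold Spec_mixer mixer mixer_alt
  by_cases h : p.toList.length = 0
  · have : p.toList = [] := List.eq_nil_of_length_eq_zero h
    simp [this, mixerGo]
    decide
  · obtain ⟨hf, hg, hc⟩ := build_spec p.toList (by
      intro hnil; exact h (by simp [hnil]))
    simp only [h]
    congr 1
    exact go_eq p.toList.length (build p.toList) p.toList 947 hg hf.symm rfl hc
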